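-- pv_equiv track=rewrite | github.com/Michaszek224/praktykaiszeregowaniezadan | zadanie1/algorytmy3/151893/151893.py | total_lateness
-- ===== SOURCE A (Python) =====
-- def total_lateness(batches, setup_time):
--     total = 0
--     t = 0
--     first = True
--
--     for batch in batches:
--         if not batch:
--             continue
--         if not first:
--             t += setup_time
--         t += sum(task[1] for task in batch)
--         for _, _, d in batch:
--             total += max(0, t - d)
--         first = False
--     return total
-- ===== SOURCE B (Python) =====
-- def total_lateness(batches, setup_time):
--     def go(bs, i, cum):
--         if not bs:
--             return 0
--         b = bs[0]
--         cum += sum(task[1] for task in b)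
--         e = i * setup_time + cum
--         return sum(e - task[2] for task in b if e > task[2]) + go(bs[1:], i + 1, cum)
--     return go([b for b in batches if b], 0, 0)
-- ===== Notes on version B (the rewrite author's own statement) =====
-- stated objective: alternative
-- what changed: Replaces A's iterative clock simulation (a running time t with a `first` flag conditionally adding the setup, and max(0,..) per task) by a recursion over the pre-filtered non-empty batches whose end time is the closed form i*setup_time + cumulative work (no conditional setup charging) and whose per-batch tardiness is a filtered sum over only the late tasks.
import Mathlib
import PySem

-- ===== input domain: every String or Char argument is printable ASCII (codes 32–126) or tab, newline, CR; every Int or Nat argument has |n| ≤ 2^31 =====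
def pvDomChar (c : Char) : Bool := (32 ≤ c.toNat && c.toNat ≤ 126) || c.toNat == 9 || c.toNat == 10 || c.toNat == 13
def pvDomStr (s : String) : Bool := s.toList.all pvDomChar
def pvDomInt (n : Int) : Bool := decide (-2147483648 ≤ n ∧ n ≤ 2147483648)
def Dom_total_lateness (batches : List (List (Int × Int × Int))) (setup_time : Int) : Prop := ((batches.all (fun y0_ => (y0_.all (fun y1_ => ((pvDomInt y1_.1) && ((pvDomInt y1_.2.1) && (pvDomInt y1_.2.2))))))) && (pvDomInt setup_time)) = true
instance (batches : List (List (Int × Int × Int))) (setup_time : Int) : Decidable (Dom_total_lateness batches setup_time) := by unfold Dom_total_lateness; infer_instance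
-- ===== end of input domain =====

-- B replaces A's clock simulation (running t, `first` flag, max(0,..)) by recursion over the
-- pre-filtered non-empty batches with the closed-form end time i*setup_time + cumulative work
-- and a filtered sum over only the late tasks.

-- ===== PORT A =====
-- sum(task[1] for task in batch)
def pvSumP (batch : List (Int × Int × Int)) : Int :=
  batch.foldl (fun a task => a + task.2.1) 0

-- the `for batch in batches` loop with state (total, t, first)
def pvALoop (setup_time : Int) : List (List (Int × Int × Int)) → Int → Int → Bool → Int
  | [], total, _, _ => total
  | batch :: rest, total, t, first =>
    if batch = [] then pvALoop setup_time rest total t first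
    else
      let t1 := if first then t else t + setup_time
      let t2 := t1 + pvSumP batch
      let total2 := batch.foldl (fun a task => a + max 0 (t2 - task.2.2)) total
      pvALoop setup_time rest total2 t2 false

def total_lateness (batches : List (List (Int × Int × Int))) (setup_time : Int) : Int :=
  pvALoop setup_time batches 0 0 true

-- ===== PORT B =====
-- sum(task[1] for task in b)
def pvWork (b : List (Int × Int × Int)) : Int :=
  (b.map (fun task => task.2.1)).sum

-- sum(e - task[2] for task in b if e > task[2])
def pvLateSum (b : List (Int × Int × Int)) (e : Int) : Int :=
  ((b.filter (fun task => e > task.2.2)).map (fun task => e - task.2.2)).sum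

-- def go(bs, i, cum): recursion on bs
def pvGo (setup_time : Int) : List (List (Int × Int × Int)) → Int → Int → Int
  | [], _, _ => 0
  | b :: rest, i, cum0 =>
    let cum := cum0 + pvWork b
    let e := i * setup_time + cum
    pvLateSum b e + pvGo setup_time rest (i + 1) cum

def total_lateness_alt (batches : List (List (Int × Int × Int))) (setup_time : Int) : Int :=
  pvGo setup_time (batches.filter (fun b => !b.isEmpty)) 0 0

-- ===== PRECONDITION & SPEC =====
def Spec_total_lateness (batches : List (List (Int × Int × Int))) (setup_time : Int) (out : Int) : Prop := out = total_lateness_alt batches setup_time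
instance (batches : List (List (Int × Int × Int))) (setup_time : Int) (out : Int) : Decidable (Spec_total_lateness batches setup_time out) := by unfold Spec_total_lateness; infer_instance

-- ===== CLAIM (what is proved, stated in full; the proofs are below) =====
def Claim_equal_total_lateness : Prop := ∀ (batches : List (List (Int × Int × Int))) (setup_time : Int), Dom_total_lateness batches setup_time → Spec_total_lateness batches setup_time (total_lateness batches setup_time)

-- ===== LEMMAS AND PROOFS =====

theorem pvSumP_eq_pvWork (batch : List (Int × Int × Int)) : pvSumP batch = pvWork batch := by
  have h : ∀ (l : List (Int × Int × Int)) (a : Int),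
      l.foldl (fun a task => a + task.2.1) a = a + (l.map (fun task => task.2.1)).sum := by
    intro l
    induction l with
    | nil => intro a; simp
    | cons x xs ih => intro a; simp [List.foldl, ih]; ring
  simpa [pvSumP, pvWork] using h batch 0

-- A's per-batch fold of max(0, t-d) equals B's filtered sum over late tasks
theorem pvFold_late (batch : List (Int × Int × Int)) (t total : Int) :
    batch.foldl (fun a task => a + max 0 (t - task.2.2)) total = total + pvLateSum batch t := by
  induction batch generalizing total with
  | nil => simp [pvLateSum]
  | cons x xs ih =>
    by_cases hx : t > x.2.2
    · have : max 0 (t - x.2.2) = t - x.2.2 := by omega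
      simp [List.foldl, ih, pvLateSum, hx, this]; ring
    · have : max 0 (t - x.2.2) = 0 := by omega
      simp [List.foldl, ih, pvLateSum, hx, this]

-- skipping empty batches is the same as filtering them out up front
theorem pvALoop_filter (setup_time : Int) (bs : List (List (Int × Int × Int)))
    (total t : Int) (first : Bool) :
    pvALoop setup_time bs total t first
      = pvALoop setup_time (bs.filter (fun b => !b.isEmpty)) total t first := by
  induction bs generalizing total t first with
  | nil => rfl
  | cons b rest ih =>
    by_cases hb : b = []
    · subst hb; simp [pvALoop, ih]
    · have hne : b.isEmpty = false := by
        cases b with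
        | nil => exact absurd rfl hb
        | cons x xs => rfl
      simp [pvALoop, hb, hne, ih]

-- invariant linking A's running clock t to B's (index, cumulative work) state:
-- t = (i-1)*setup_time + cum
theorem pvALoop_main (setup_time : Int) (bs : List (List (Int × Int × Int)))
    (h : ∀ b ∈ bs, b ≠ []) :
    ∀ (total t i : Int),
      pvALoop setup_time bs total ((i - 1) * setup_time + t) false
        = total + pvGo setup_time bs i t := by
  induction bs with
  | nil => intro total t i; simp [pvALoop, pvGo]
  | cons b rest ih =>
    intro total t i
    have hb : b ≠ [] := h b (by simp)
    have hrest : ∀ x ∈ rest, x ≠ [] := fun x hx => h x (by simp [hx])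
    simp only [pvALoop, if_neg hb, if_neg Bool.false_ne_true, pvGo]
    rw [pvFold_late, pvSumP_eq_pvWork]
    have harg : (i - 1) * setup_time + t + setup_time + pvWork b
        = ((i + 1) - 1) * setup_time + (t + pvWork b) := by ring
    rw [harg, ih hrest]
    have he : ((i + 1) - 1) * setup_time + (t + pvWork b)
        = i * setup_time + (t + pvWork b) := by ring
    rw [he]
    ring

theorem total_lateness_eq (batches : List (List (Int × Int × Int))) (setup_time : Int) :
    total_lateness batches setup_time = total_lateness_alt batches setup_time := by
  unfold total_lateness total_lateness_alt
  rw [pvALoop_filter]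
  have hall : ∀ b ∈ batches.filter (fun b => !b.isEmpty), b ≠ [] := by
    intro b hb
    have := List.of_mem_filter hb
    simpa [List.isEmpty_iff] using this
  generalize hg : batches.filter (fun b => !b.isEmpty) = nel at hall ⊢
  cases nel with
  | nil => simp [pvALoop, pvGo]
  | cons b rest =>
    have hb : b ≠ [] := hall b List.mem_cons_self
    have hrest : ∀ x ∈ rest, x ≠ [] := fun x hx => hall x (List.mem_cons_of_mem b hx)
    simp only [pvALoop, if_neg hb, if_true, pvGo]
    rw [pvFold_late, pvSumP_eq_pvWork]
    have harg : (0:Int) + pvWork b = ((0 + 1) - 1) * setup_time + (0 + pvWork b) := by ring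
    rw [harg, pvALoop_main setup_time rest hrest]
    have he : (((0:Int) + 1) - 1) * setup_time + (0 + pvWork b) = 0 * setup_time + (0 + pvWork b) := by ring
    rw [he]
    ring

-- ===== VERDICT (by name: the statement is the Claim_ definition above) =====
theorem total_lateness_spec : Claim_equal_total_lateness := by
  intro batches setup_time _
  unfold Spec_total_lateness
  exact total_lateness_eq batches setup_time
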